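-- pv_equiv track=rewrite | github.com/Bhanuprakashp05/python-assesment | program -4 .py | count_multiples
-- ===== SOURCE A (Python) =====
-- def count_multiples(numbers):
--     divisors = [1,2,3,4,5,6,7,8,9]
--     result = {}
--
--     for d in divisors:
--         count = 0
--         for n in numbers:
--             if n % d == 0:
--                 count += 1
--         result[d] = count
--
--     return result
-- ===== SOURCE B (Python) =====
-- def count_multiples(numbers):
--     # Bucket by residue mod 2520 = lcm(1..9); n % d depends only on n % 2520 for d in 1..9.
--     freq = {}
--     for n in numbers:
--         r = n % 2520
--         freq[r] = freq.get(r, 0) + 1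
--     return {d: sum(c for r, c in freq.items() if r % d == 0) for d in range(1, 10)}
-- ===== Notes on version B (the rewrite author's own statement) =====
-- stated objective: faster
-- what changed: A scans the whole list once per divisor (nine full passes with a per-element modulo each); B buckets the input once into a frequency table of residues mod 2520 = lcm(1..9) and answers each divisor by summing bucket counts, so the nine divisor scans run over at most 2520 distinct residues instead of over the list.
import Mathlib
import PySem

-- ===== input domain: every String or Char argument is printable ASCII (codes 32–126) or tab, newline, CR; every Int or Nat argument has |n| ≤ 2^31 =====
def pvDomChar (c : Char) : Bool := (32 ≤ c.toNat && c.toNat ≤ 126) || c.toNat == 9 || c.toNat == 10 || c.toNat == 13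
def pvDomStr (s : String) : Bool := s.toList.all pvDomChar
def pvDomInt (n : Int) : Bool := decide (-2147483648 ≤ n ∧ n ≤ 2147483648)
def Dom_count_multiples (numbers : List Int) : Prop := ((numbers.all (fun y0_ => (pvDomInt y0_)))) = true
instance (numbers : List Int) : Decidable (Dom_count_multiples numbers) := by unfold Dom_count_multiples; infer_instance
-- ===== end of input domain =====

-- B replaces A's nine full scans of `numbers` (one per divisor) with one bucketing pass
-- into a frequency table of residues mod 2520 = lcm(1..9), answering each divisor by
-- summing bucket counts; same result, different algorithm.

-- ===== PORT A =====
def count_multiples (numbers : List Int) : List (Int × Int) :=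
  let divisors : List Int := [1,2,3,4,5,6,7,8,9]
  (divisors.foldl (fun result d =>
      result.insert d
        (numbers.foldl (fun count n =>
          if PySem.Int.mod n d == 0 then count + 1 else count) (0 : Int)))
    PySem.Dict.empty).items

-- ===== PORT B =====
def count_multiples_alt (numbers : List Int) : List (Int × Int) :=
  let freq : PySem.Dict Int Int :=
    numbers.foldl (fun f n =>
      f.insert (PySem.Int.mod n 2520) (f.getD (PySem.Int.mod n 2520) 0 + 1)) PySem.Dict.empty
  ((PySem.List.pyRange 1 10 1).foldl (fun res d =>
      res.insert d
        (freq.items.foldl (fun s p =>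
          if PySem.Int.mod p.1 d == 0 then s + p.2 else s) (0 : Int)))
    PySem.Dict.empty).items

-- ===== PRECONDITION & SPEC =====
def Spec_count_multiples (numbers : List Int) (out : List (Int × Int)) : Prop := out = count_multiples_alt numbers
instance (numbers : List Int) (out : List (Int × Int)) : Decidable (Spec_count_multiples numbers out) := by unfold Spec_count_multiples; infer_instance

-- ===== CLAIM (what is proved, stated in full; the proofs are below) =====
def Claim_equal_count_multiples : Prop := ∀ (numbers : List Int), Dom_count_multiples numbers → Spec_count_multiples numbers (count_multiples numbers)

-- ===== LEMMAS AND PROOFS =====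

-- A's result: the literal nine-entry table of countP's.
theorem pv_count_multiples_eq (numbers : List Int) :
    count_multiples numbers
      = ([1,2,3,4,5,6,7,8,9] : List Int).map
          (fun d => (d, (numbers.countP (fun n => PySem.Int.mod n d == 0) : Int))) := by
  unfold count_multiples
  rw [show (fun (result : PySem.Dict Int Int) (d : Int) =>
        result.insert d
          (numbers.foldl (fun count n =>
            if PySem.Int.mod n d == 0 then count + 1 else count) (0 : Int)))
      = fun result d => result.insert (id d)
          (numbers.foldl (fun count n =>
            if PySem.Int.mod n d == 0 then count + 1 else count) (0 : Int)) from rfl]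
  rw [PySem.Dict.items_foldl_insert_fresh]
  · simp only [PySem.List.foldl_if_add_one, zero_add, id_eq]
    simp [PySem.Dict.empty]
  · intro a _; simp
  · decide

theorem pv_sum_indicator (r : Int) (v : List Int) (hv : v.Nodup) :
    (v.map (fun k => if r = k then (1 : Int) else 0)).sum = if r ∈ v then 1 else 0 := by
  induction v with
  | nil => simp
  | cons a v ih =>
    rcases List.nodup_cons.mp hv with ⟨ha, hv'⟩
    by_cases h : r = a
    · subst h
      simp [ha, ih hv']
    · simp [h, ih hv']

theorem pv_sum_counts (rs : List Int) (q : Int → Bool) (u : List Int) (hu : u.Nodup) :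
    ((u.filter q).map (fun k => (rs.count k : Int))).sum
      = (rs.countP (fun x => decide (x ∈ u) && q x) : Int) := by
  induction rs with
  | nil => simp
  | cons r rs ih =>
    have hstep : ((u.filter q).map (fun k => ((r :: rs).count k : Int))).sum
        = ((u.filter q).map (fun k => (rs.count k : Int))).sum
          + ((u.filter q).map (fun k => if r = k then (1 : Int) else 0)).sum := by
      rw [← List.sum_map_add]
      apply congrArg
      apply List.map_congr_left
      intro k _
      rw [List.count_cons]
      by_cases h : k = r
      · subst h; simp
      · have h2 : ¬ r = k := fun h' => h h'.symm
        simp [h2]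
    rw [hstep, ih, pv_sum_indicator r _ (hu.filter q), List.countP_cons]
    have hmem : r ∈ u.filter q ↔ (decide (r ∈ u) && q r) = true := by
      simp [List.mem_filter]
    by_cases h : (decide (r ∈ u) && q r) = true
    · rw [if_pos (hmem.mpr h), if_pos h]; push_cast; ring
    · rw [if_neg (fun hm => h (hmem.mp hm)), if_neg h]; simp

-- the inner fold over the frequency table's items sums the multiplicities of the
-- residues divisible by d, i.e. counts the residues in rs divisible by d
theorem pv_inner_fold (rs : List Int) (d : Int) :
    (PySem.Dict.counter rs).items.foldl
        (fun s p => if PySem.Int.mod p.1 d == 0 then s + p.2 else s) (0 : Int)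
      = (rs.countP (fun x => PySem.Int.mod x d == 0) : Int) := by
  rw [PySem.Dict.items_counter, PySem.List.foldl_if_eq_foldl_filter, List.filter_map,
    PySem.List.foldl_add (g := fun p : Int × Int => p.2), List.map_map]
  simp only [zero_add]
  have hcomp1 : ((fun p : Int × Int => PySem.Int.mod p.1 d == 0) ∘
      fun k : Int => (k, (rs.count k : Int))) = fun k : Int => PySem.Int.mod k d == 0 := rfl
  have hcomp2 : ((fun p : Int × Int => p.2) ∘ fun k : Int => (k, (rs.count k : Int)))
      = fun k : Int => (rs.count k : Int) := rfl
  rw [hcomp1, hcomp2,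
    pv_sum_counts rs (fun k => PySem.Int.mod k d == 0) (PySem.Set.ofList rs)
      (PySem.Set.nodup_ofList rs)]
  apply congrArg
  apply List.countP_congr
  intro x hx
  have hmem : x ∈ PySem.Set.ofList rs := (PySem.Set.mem_ofList rs x).mpr hx
  simp [hmem]

-- B's result reduces to the same nine-entry table of countP's.
theorem pv_count_multiples_alt_eq (numbers : List Int) :
    count_multiples_alt numbers
      = ([1,2,3,4,5,6,7,8,9] : List Int).map
          (fun d => (d, (numbers.countP (fun n => PySem.Int.mod n d == 0) : Int))) := by
  have hfreq : numbers.foldl (fun f n =>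
        f.insert (PySem.Int.mod n 2520) (f.getD (PySem.Int.mod n 2520) 0 + 1)) PySem.Dict.empty
      = PySem.Dict.counter (numbers.map (fun n => PySem.Int.mod n 2520)) := by
    rw [← PySem.Dict.foldl_insert_getD_add_one_eq_counter, List.foldl_map]
  have key : ∀ (freq : PySem.Dict Int Int),
      freq = PySem.Dict.counter (numbers.map (fun n => PySem.Int.mod n 2520)) →
      ((PySem.List.pyRange 1 10 1).foldl (fun res d =>
          res.insert d
            (freq.items.foldl (fun s p =>
              if PySem.Int.mod p.1 d == 0 then s + p.2 else s) (0 : Int)))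
        PySem.Dict.empty).items
        = ([1,2,3,4,5,6,7,8,9] : List Int).map
            (fun d => (d, (numbers.countP (fun n => PySem.Int.mod n d == 0) : Int))) := by
    intro freq hf
    subst hf
    rw [show PySem.List.pyRange 1 10 1 = ([1,2,3,4,5,6,7,8,9] : List Int) from by decide]
    rw [show (fun (res : PySem.Dict Int Int) (d : Int) =>
          res.insert d
            ((PySem.Dict.counter (numbers.map (fun n => PySem.Int.mod n 2520))).items.foldl
              (fun s p => if PySem.Int.mod p.1 d == 0 then s + p.2 else s) (0 : Int)))
        = fun res d => res.insert (id d)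
            ((PySem.Dict.counter (numbers.map (fun n => PySem.Int.mod n 2520))).items.foldl
              (fun s p => if PySem.Int.mod p.1 d == 0 then s + p.2 else s) (0 : Int)) from rfl]
    rw [PySem.Dict.items_foldl_insert_fresh]
    · simp only [id_eq, PySem.Dict.empty, List.nil_append]
      apply List.map_congr_left
      intro d hd
      refine congrArg _ ?_
      rw [pv_inner_fold, List.countP_map]
      apply congrArg
      apply List.countP_congr
      intro n _
      -- (n % 2520) % d = n % d for every d in 1..9, since 0 < d and d divides 2520
      have hd' : (0 : Int) < d ∧ d ∣ 2520 := by
        fin_cases hd <;> exact ⟨by norm_num, by decide⟩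
      have hm : PySem.Int.mod (PySem.Int.mod n 2520) d = PySem.Int.mod n d := by
        rw [PySem.Int.mod_eq_emod_of_pos (show (0:Int) < 2520 by norm_num),
          PySem.Int.mod_eq_emod_of_pos hd'.1, PySem.Int.mod_eq_emod_of_pos hd'.1,
          Int.emod_emod_of_dvd n hd'.2]
      simp only [Function.comp_apply, beq_iff_eq]
      rw [hm]
    · intro a _; simp
    · decide
  exact key _ hfreq

-- ===== VERDICT (by name: the statement is the Claim_ definition above) =====
theorem count_multiples_spec : Claim_equal_count_multiples := by
  intro numbers _
  unfold Spec_count_multiples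
  rw [pv_count_multiples_eq, pv_count_multiples_alt_eq]
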